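-- pv_equiv track=rewrite | github.com/toreJohnsen/ps.editor.actions | xmi/feature_catalog.py | _build_inheritance_chain
-- ===== SOURCE A (Python) =====
-- from typing import Any, Callable, Iterable, Mapping, Sequence
--
-- def _build_inheritance_chain(
--     class_id: str,
--     parents: Mapping[str, Sequence[str]],
-- ) -> list[str]:
--     chain: list[str] = []
--     visited: set[str] = set()
--
--     def visit(current: str) -> None:
--         if current in visited:
--             return
--         visited.add(current)
--         for parent in parents.get(current, []):
--             visit(parent)
--         chain.append(current)
--
--     visit(class_id)
--     return chain
-- ===== SOURCE B (Python) =====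
-- from typing import Mapping, Sequence
--
-- def _build_inheritance_chain(
--     class_id: str,
--     parents: Mapping[str, Sequence[str]],
-- ) -> list[str]:
--     chain: list[str] = []
--     visited = {class_id}
--     stack: list[tuple[str, int]] = [(class_id, 0)]
--     while stack:
--         node, i = stack[-1]
--         ps = parents.get(node, [])
--         if i < len(ps):
--             stack[-1] = (node, i + 1)
--             p = ps[i]
--             if p not in visited:
--                 visited.add(p)
--                 stack.append((p, 0))
--         else:
--             stack.pop()
--             chain.append(node)
--     return chain
-- ===== Notes on version B (the rewrite author's own statement) =====
-- stated objective: alternative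
-- what changed: The recursive closure-based DFS (nested visit function mutating chain/visited) is replaced by an explicit iterative stack of (node, parent-index) frames, marking nodes visited on entry and emitting each node when its parents are exhausted; no recursion is used.
import Mathlib
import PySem

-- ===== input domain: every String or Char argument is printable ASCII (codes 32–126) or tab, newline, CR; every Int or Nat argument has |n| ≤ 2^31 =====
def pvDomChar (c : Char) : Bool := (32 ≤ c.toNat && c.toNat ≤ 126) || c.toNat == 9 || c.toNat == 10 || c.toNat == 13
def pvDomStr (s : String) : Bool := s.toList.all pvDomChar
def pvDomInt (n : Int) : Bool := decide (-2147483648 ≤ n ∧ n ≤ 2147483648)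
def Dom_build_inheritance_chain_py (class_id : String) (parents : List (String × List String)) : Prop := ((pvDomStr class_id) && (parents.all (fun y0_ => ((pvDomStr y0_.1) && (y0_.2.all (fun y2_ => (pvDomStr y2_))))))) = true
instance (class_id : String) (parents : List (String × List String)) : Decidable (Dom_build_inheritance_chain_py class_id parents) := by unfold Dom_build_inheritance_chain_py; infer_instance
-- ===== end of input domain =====

-- B replaces A's recursive closure-based DFS by an explicit iterative stack loop
-- (frames of node + parent index) producing the same post-order chain.
-- Note: Python A can hit the interpreter recursion limit on extremely deep chains; B iterates.

-- ===== PORT A =====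
-- A's recursive `visit`, fuelled; the fuel chosen in the port below is proved sufficient in the lemmas.
def pvVisitA (parents : List (String × List String)) : Nat → String → List String × PySem.Set String → List String × PySem.Set String
  | 0, _, st => st
  | n + 1, cur, st =>
    if PySem.Set.contains st.2 cur then st
    else
      let st1 := ((PySem.Dict.mk parents).getD cur []).foldl (fun acc p => pvVisitA parents n p acc)
        (st.1, PySem.Set.add st.2 cur)
      (st1.1 ++ [cur], st1.2)

def build_inheritance_chain_py (class_id : String) (parents : List (String × List String)) : List String :=
  (pvVisitA parents (class_id :: parents.flatMap (fun kv => kv.2)).length class_id ([], PySem.Set.empty)).1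

-- ===== PORT B =====
-- Source B's while-loop over a stack of (node, index-into-parents) frames; head of the list = top of the stack.
def pvLoopB (parents : List (String × List String)) : Nat → List (String × Nat) → PySem.Set String → List String → List String
  | 0, _, _, chain => chain
  | _ + 1, [], _, chain => chain
  | n + 1, (node, i) :: rest, visited, chain =>
    let ps := (PySem.Dict.mk parents).getD node []
    if h : i < ps.length then
      let p := ps[i]
      if PySem.Set.contains visited p then
        pvLoopB parents n ((node, i + 1) :: rest) visited chain
      else
        pvLoopB parents n ((p, 0) :: (node, i + 1) :: rest) (PySem.Set.add visited p) chain
    else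
      pvLoopB parents n rest visited (chain ++ [node])

def build_inheritance_chain_py_alt (class_id : String) (parents : List (String × List String)) : List String :=
  -- fuel: a safe upper bound on the number of loop iterations, proved sufficient below
  let n := (class_id :: parents.flatMap (fun kv => kv.2)).length
  pvLoopB parents ((n + 1) * (n + 1)) [(class_id, 0)] (PySem.Set.add PySem.Set.empty class_id) []

-- ===== PRECONDITION & SPEC =====
def Spec_build_inheritance_chain_py (class_id : String) (parents : List (String × List String)) (out : List String) : Prop := out = build_inheritance_chain_py_alt class_id parents
instance (class_id : String) (parents : List (String × List String)) (out : List String) : Decidable (Spec_build_inheritance_chain_py class_id parents out) := by unfold Spec_build_inheritance_chain_py; infer_instance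

-- ===== CLAIM (what is proved, stated in full; the proofs are below) =====
def Claim_equal_build_inheritance_chain_py : Prop := ∀ (class_id : String) (parents : List (String × List String)), Dom_build_inheritance_chain_py class_id parents → Spec_build_inheritance_chain_py class_id parents (build_inheritance_chain_py class_id parents)

-- ===== LEMMAS AND PROOFS =====

-- the universe of names the DFS can ever visit
def pvAll (class_id : String) (parents : List (String × List String)) : List String :=
  class_id :: parents.flatMap (fun kv => kv.2)

-- number of not-yet-visited occurrences in that universe (the termination measure)
def pvMu (class_id : String) (parents : List (String × List String)) (v : PySem.Set String) : Nat :=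
  ((pvAll class_id parents).filter (fun x => !(PySem.Set.contains v x))).length

lemma pv_getD_sub (parents : List (String × List String)) (node x : String)
    (hx : x ∈ (PySem.Dict.mk parents).getD node []) : x ∈ parents.flatMap (fun kv => kv.2) := by
  induction parents with
  | nil =>
      rw [PySem.Dict.getD_eq_get?_getD] at hx
      simp [PySem.Dict.get?] at hx
  | cons kv rest ih =>
      obtain ⟨k, v⟩ := kv
      rw [PySem.Dict.getD_eq_get?_getD, PySem.Dict.get?_mk_cons] at hx
      by_cases hk : (k == node) = true
      · simp [hk] at hx; simp [List.flatMap_cons]; left; exact hx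
      · simp only [hk, Bool.false_eq_true, if_false] at hx
        simp only [List.flatMap_cons, List.mem_append]
        right
        exact ih (by rw [PySem.Dict.getD_eq_get?_getD]; exact hx)

lemma pv_getD_len (parents : List (String × List String)) (node : String) :
    ((PySem.Dict.mk parents).getD node []).length ≤ (parents.flatMap (fun kv => kv.2)).length := by
  induction parents with
  | nil =>
      rw [PySem.Dict.getD_eq_get?_getD]
      simp [PySem.Dict.get?]
  | cons kv rest ih =>
      obtain ⟨k, v⟩ := kv
      rw [PySem.Dict.getD_eq_get?_getD, PySem.Dict.get?_mk_cons]
      by_cases hk : (k == node) = true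
      · simp [hk, List.flatMap_cons]
      · simp only [hk, Bool.false_eq_true, if_false, List.flatMap_cons, List.length_append]
        rw [← PySem.Dict.getD_eq_get?_getD]
        omega

lemma pv_fold_mono (f : String → List String × PySem.Set String → List String × PySem.Set String)
    (hf : ∀ p st x, x ∈ st.2 → x ∈ (f p st).2) :
    ∀ (ps : List String) (st : List String × PySem.Set String) (x : String),
      x ∈ st.2 → x ∈ (ps.foldl (fun acc p => f p acc) st).2 := by
  intro ps
  induction ps with
  | nil => intro st x hx; simpa using hx
  | cons a t ih => intro st x hx; exact ih _ _ (hf a st x hx)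

lemma pv_visit_mono (parents : List (String × List String)) :
    ∀ (n : Nat) (cur : String) (st : List String × PySem.Set String) (x : String),
      x ∈ st.2 → x ∈ (pvVisitA parents n cur st).2 := by
  intro n
  induction n with
  | zero => intro cur st x hx; simpa [pvVisitA] using hx
  | succ n ih =>
      intro cur st x hx
      rw [pvVisitA]
      by_cases hc : cur ∈ st.2
      · simpa [hc] using hx
      · simp only [if_neg (show ¬ (PySem.Set.contains st.2 cur = true) by simp [hc])]
        exact pv_fold_mono _ (fun p st x hx => ih p st x hx) _ (st.1, PySem.Set.add st.2 cur) x
          (by simp [PySem.Set.mem_add]; left; exact hx)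

lemma pv_filter_len_mono {α : Type} (l : List α) (p q : α → Bool)
    (h : ∀ x, q x = true → p x = true) : (l.filter q).length ≤ (l.filter p).length := by
  induction l with
  | nil => simp
  | cons a t ih =>
      by_cases hq : q a = true
      · simp [hq, h a hq]; omega
      · simp only [List.filter_cons, Bool.not_eq_true] at *
        rcases hp : p a <;> simp_all <;> omega

lemma pv_mu_anti (class_id : String) (parents : List (String × List String))
    (v w : PySem.Set String) (h : ∀ x, x ∈ v → x ∈ w) :
    pvMu class_id parents w ≤ pvMu class_id parents v := by
  apply pv_filter_len_mono
  intro x hx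
  simp only [Bool.not_eq_true', ← Bool.not_eq_true] at *
  intro hc
  exact absurd (h x (by simpa [PySem.Set.contains_iff] using hc)) (by simpa [PySem.Set.contains_iff] using hx)

lemma pv_mu_add_lt (class_id : String) (parents : List (String × List String))
    (v : PySem.Set String) (x : String) (hal : x ∈ pvAll class_id parents) (hx : x ∉ v) :
    pvMu class_id parents (PySem.Set.add v x) < pvMu class_id parents v := by
  unfold pvMu
  rw [PySem.Set.add_of_not_mem hx]
  have hpt : ∀ y, (fun y => !(PySem.Set.contains (v ++ [x]) y)) y
      = ((fun y => !(PySem.Set.contains v y)) y && (fun y => !(y == x)) y) := by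
    intro y
    by_cases h1 : y ∈ v <;> by_cases h2 : y = x <;> simp [h1, h2]
  rw [List.filter_congr (fun y _ => hpt y), ← List.filter_filter, List.filter_comm]
  have hxmem : x ∈ (pvAll class_id parents).filter (fun y => !(PySem.Set.contains v y)) := by
    simp [List.mem_filter, hal, hx]
  generalize ((pvAll class_id parents).filter (fun y => !(PySem.Set.contains v y))) = l at hxmem ⊢
  induction l with
  | nil => simp at hxmem
  | cons a t ih =>
      rw [List.filter_cons]
      rcases List.mem_cons.mp hxmem with rfl | h
      · have := List.length_filter_le (fun y => !(y == x)) t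
        simp only [beq_self_eq_true, Bool.not_true, Bool.false_eq_true, if_false, List.length_cons]
        omega
      · have := ih h
        by_cases hax : (!(a == x)) = true
        · simp only [hax, if_true, List.length_cons]
          omega
        · simp only [Bool.not_eq_true] at hax
          simp only [hax, Bool.false_eq_true, if_false, List.length_cons]
          omega

lemma pv_mu_zero_contains (class_id : String) (parents : List (String × List String))
    (v : PySem.Set String) (cur : String) (hal : cur ∈ pvAll class_id parents)
    (h0 : pvMu class_id parents v = 0) : PySem.Set.contains v cur = true := by
  by_contra hc
  have hmem : cur ∈ (pvAll class_id parents).filter (fun x => !(PySem.Set.contains v x)) := by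
    simp only [List.mem_filter, hal, true_and, Bool.not_eq_true']
    simp only [Bool.not_eq_true] at hc
    exact hc
  have := List.length_pos_of_mem hmem
  unfold pvMu at h0
  omega

lemma pv_mu_le (class_id : String) (parents : List (String × List String)) (v : PySem.Set String) :
    pvMu class_id parents v ≤ (pvAll class_id parents).length :=
  List.length_filter_le _ _

lemma pv_fold_stab (class_id : String) (parents : List (String × List String)) (n m : Nat)
    (H : ∀ (m' : Nat) (cur : String) (st : List String × PySem.Set String),
      cur ∈ pvAll class_id parents →
      pvMu class_id parents st.2 ≤ n → pvMu class_id parents st.2 ≤ m' →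
      pvVisitA parents n cur st = pvVisitA parents m' cur st) :
    ∀ (ps : List String) (st : List String × PySem.Set String),
      (∀ x ∈ ps, x ∈ pvAll class_id parents) →
      pvMu class_id parents st.2 ≤ n → pvMu class_id parents st.2 ≤ m →
      ps.foldl (fun acc p => pvVisitA parents n p acc) st
        = ps.foldl (fun acc p => pvVisitA parents m p acc) st := by
  intro ps
  induction ps with
  | nil => intro st _ _ _; rfl
  | cons a t ih =>
      intro st hall hn hm
      have ha := H m a st (hall a (by simp)) hn hm
      have hmu : pvMu class_id parents (pvVisitA parents n a st).2 ≤ pvMu class_id parents st.2 :=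
        pv_mu_anti class_id parents st.2 _ (fun x hx => pv_visit_mono parents n a st x hx)
      simp only [List.foldl_cons]
      rw [← ha]
      exact ih (pvVisitA parents n a st) (fun x hx => hall x (by simp [hx]))
        (le_trans hmu hn) (le_trans hmu hm)

lemma pv_stab (class_id : String) (parents : List (String × List String)) :
    ∀ (n m : Nat) (cur : String) (st : List String × PySem.Set String),
      cur ∈ pvAll class_id parents →
      pvMu class_id parents st.2 ≤ n → pvMu class_id parents st.2 ≤ m →
      pvVisitA parents n cur st = pvVisitA parents m cur st := by
  intro n
  induction n with
  | zero =>
      intro m cur st hal h0 _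
      have hc := pv_mu_zero_contains class_id parents st.2 cur hal (Nat.le_zero.mp h0)
      have hcm : cur ∈ st.2 := by simpa using hc
      cases m with
      | zero => rfl
      | succ m => simp [pvVisitA, hcm]
  | succ n ih =>
      intro m cur st hal hn hm
      by_cases hc : cur ∈ st.2
      · cases m with
        | zero => simp [pvVisitA, hc]
        | succ m => simp [pvVisitA, hc]
      · have hcb : ¬ (PySem.Set.contains st.2 cur = true) := by simp [hc]
        have hlt := pv_mu_add_lt class_id parents st.2 cur hal hc
        cases m with
        | zero =>
            exfalso
            have := pv_mu_le class_id parents (PySem.Set.add st.2 cur)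
            omega
        | succ m =>
            rw [pvVisitA, pvVisitA]
            simp only [if_neg hcb]
            have hfold := pv_fold_stab class_id parents n m (fun m' cur st => ih m' cur st)
              ((PySem.Dict.mk parents).getD cur []) (st.1, PySem.Set.add st.2 cur)
              (fun x hx => by
                simp only [pvAll, List.mem_cons]
                right
                exact pv_getD_sub parents cur x hx)
              (by simpa using Nat.le_of_lt_succ (lt_of_lt_of_le hlt hn))
              (by simpa using Nat.le_of_lt_succ (lt_of_lt_of_le hlt hm))
            rw [hfold]

-- the mathematical meaning of one stack frame: finish the frame's remaining parents with A's
-- recursive visit (at canonical fuel), then emit the node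
def pvFinishB (class_id : String) (parents : List (String × List String)) :
    List (String × Nat) → List String × PySem.Set String → List String
  | [], st => st.1
  | (node, i) :: rest, st =>
    let st1 := (((PySem.Dict.mk parents).getD node []).drop i).foldl
      (fun acc p => pvVisitA parents (pvAll class_id parents).length p acc) st
    pvFinishB class_id parents rest (st1.1 ++ [node], st1.2)

def pvCost (parents : List (String × List String)) (stack : List (String × Nat)) : Nat :=
  stack.foldr (fun f a => a + 1 + (((PySem.Dict.mk parents).getD f.1 []).length - f.2)) 0

lemma pv_visit_unroll (class_id : String) (parents : List (String × List String))
    (p : String) (chain : List String) (visited : PySem.Set String)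
    (hpv : p ∉ visited) (hpal : p ∈ pvAll class_id parents) :
    pvVisitA parents (pvAll class_id parents).length p (chain, visited)
      = ((((PySem.Dict.mk parents).getD p []).foldl
            (fun acc q => pvVisitA parents (pvAll class_id parents).length q acc)
            (chain, PySem.Set.add visited p)).1 ++ [p],
         (((PySem.Dict.mk parents).getD p []).foldl
            (fun acc q => pvVisitA parents (pvAll class_id parents).length q acc)
            (chain, PySem.Set.add visited p)).2) := by
  have hN : (pvAll class_id parents).length = (parents.flatMap (fun kv => kv.2)).length + 1 := by
    simp [pvAll]
  have hmuN := pv_mu_le class_id parents visited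
  have hmu := pv_mu_add_lt class_id parents visited p hpal hpv
  have hfold := pv_fold_stab class_id parents
    ((parents.flatMap (fun kv => kv.2)).length) ((pvAll class_id parents).length)
    (fun m' cur st h1 h2 h3 =>
      pv_stab class_id parents ((parents.flatMap (fun kv => kv.2)).length) m' cur st h1 h2 h3)
    ((PySem.Dict.mk parents).getD p []) (chain, PySem.Set.add visited p)
    (fun x hx => by
      simp only [pvAll, List.mem_cons]
      right
      exact pv_getD_sub parents p x hx)
    (by show pvMu class_id parents (PySem.Set.add visited p) ≤ _; omega)
    (by show pvMu class_id parents (PySem.Set.add visited p) ≤ _; omega)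
  conv_lhs => rw [hN, pvVisitA]
  rw [if_neg (by simpa using hpv)]
  dsimp only
  rw [hfold]

lemma pv_cost_cons' {parents : List (String × List String)} {node : String} {i : Nat}
    {rest : List (String × Nat)} :
    pvCost parents ((node, i) :: rest)
      = pvCost parents rest + 1 + (((PySem.Dict.mk parents).getD node []).length - i) := rfl

lemma pv_main (class_id : String) (parents : List (String × List String)) :
    ∀ (n : Nat) (stack : List (String × Nat)) (visited : PySem.Set String) (chain : List String),
      pvCost parents stack + pvMu class_id parents visited * (pvAll class_id parents).length < n →
      pvLoopB parents n stack visited chain = pvFinishB class_id parents stack (chain, visited) := by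
  intro n
  induction n with
  | zero => intro stack visited chain h; exact absurd h (Nat.not_lt_zero _)
  | succ n ih =>
      intro stack visited chain h
      match stack with
      | [] => rw [pvLoopB, pvFinishB]
      | (node, i) :: rest =>
        have hcost : pvCost parents ((node, i) :: rest)
            = pvCost parents rest + 1 + (((PySem.Dict.mk parents).getD node []).length - i) := rfl
        have hN : (pvAll class_id parents).length = (parents.flatMap (fun kv => kv.2)).length + 1 := by
          simp [pvAll]
        rw [pvLoopB]
        dsimp only
        by_cases hi : i < ((PySem.Dict.mk parents).getD node []).length
        · rw [dif_pos hi]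
          have hdrop : ((PySem.Dict.mk parents).getD node []).drop i
              = ((PySem.Dict.mk parents).getD node [])[i] :: ((PySem.Dict.mk parents).getD node []).drop (i + 1) :=
            List.drop_eq_getElem_cons hi
          by_cases hpv : ((PySem.Dict.mk parents).getD node [])[i] ∈ visited
          · rw [if_pos (by simpa using hpv)]
            have hvisit : pvVisitA parents (pvAll class_id parents).length
                ((PySem.Dict.mk parents).getD node [])[i] (chain, visited) = (chain, visited) := by
              rw [hN, pvVisitA]
              simp [hpv]
            rw [ih ((node, i + 1) :: rest) visited chain (by
              rw [pv_cost_cons'] at h ⊢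
              omega)]
            rw [pvFinishB, pvFinishB]
            rw [hdrop, List.foldl_cons, hvisit]
          · rw [if_neg (by simpa using hpv)]
            have hpal : ((PySem.Dict.mk parents).getD node [])[i] ∈ pvAll class_id parents := by
              simp only [pvAll, List.mem_cons]
              right
              exact pv_getD_sub parents node _ (List.getElem_mem hi)
            have hmu := pv_mu_add_lt class_id parents visited _ hpal hpv
            have hmuN := pv_mu_le class_id parents visited
            have hlenp := pv_getD_len parents ((PySem.Dict.mk parents).getD node [])[i]
            have hmul : pvMu class_id parents (PySem.Set.add visited ((PySem.Dict.mk parents).getD node [])[i])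
                  * (pvAll class_id parents).length + (pvAll class_id parents).length
                ≤ pvMu class_id parents visited * (pvAll class_id parents).length := by
              have h1 : pvMu class_id parents (PySem.Set.add visited ((PySem.Dict.mk parents).getD node [])[i]) + 1
                  ≤ pvMu class_id parents visited := hmu
              calc pvMu class_id parents (PySem.Set.add visited ((PySem.Dict.mk parents).getD node [])[i])
                    * (pvAll class_id parents).length + (pvAll class_id parents).length
                  = (pvMu class_id parents (PySem.Set.add visited ((PySem.Dict.mk parents).getD node [])[i]) + 1)
                    * (pvAll class_id parents).length := by ring
                _ ≤ pvMu class_id parents visited * (pvAll class_id parents).length :=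
                    Nat.mul_le_mul_right _ h1
            rw [ih ((((PySem.Dict.mk parents).getD node [])[i], 0) :: (node, i + 1) :: rest)
              (PySem.Set.add visited ((PySem.Dict.mk parents).getD node [])[i]) chain (by
                rw [pv_cost_cons', pv_cost_cons']
                omega)]
            rw [pvFinishB]
            rw [List.drop_zero]
            rw [pvFinishB]
            rw [pvFinishB]
            rw [hdrop, List.foldl_cons,
              pv_visit_unroll class_id parents _ chain visited hpv hpal]
        · rw [dif_neg hi]
          have hdrop : ((PySem.Dict.mk parents).getD node []).drop i = [] :=
            List.drop_eq_nil_of_le (Nat.le_of_not_lt hi)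
          rw [ih rest visited (chain ++ [node]) (by
            rw [pv_cost_cons'] at h
            omega)]
          rw [pvFinishB]
          rw [hdrop, List.foldl_nil]

-- ===== VERDICT (by name: the statement is the Claim_ definition above) =====
theorem build_inheritance_chain_py_spec : Claim_equal_build_inheritance_chain_py := by
  intro class_id parents _
  unfold Spec_build_inheritance_chain_py build_inheritance_chain_py build_inheritance_chain_py_alt
  dsimp only
  have hN : (pvAll class_id parents).length = (parents.flatMap (fun kv => kv.2)).length + 1 := by
    simp [pvAll]
  have hmu1 : pvMu class_id parents (PySem.Set.add PySem.Set.empty class_id)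
      ≤ (parents.flatMap (fun kv => kv.2)).length := by
    unfold pvMu pvAll
    rw [List.filter_cons]
    rw [show (!(PySem.Set.contains (PySem.Set.add PySem.Set.empty class_id) class_id)) = false by
      simp]
    simp only [Bool.false_eq_true, if_false]
    exact List.length_filter_le _ _
  have hlen := pv_getD_len parents class_id
  have hΦ : pvCost parents [(class_id, 0)]
      + pvMu class_id parents (PySem.Set.add PySem.Set.empty class_id) * (pvAll class_id parents).length
      < ((class_id :: parents.flatMap (fun kv => kv.2)).length + 1)
        * ((class_id :: parents.flatMap (fun kv => kv.2)).length + 1) := by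
    have hc : pvCost parents [(class_id, 0)]
        = 0 + 1 + (((PySem.Dict.mk parents).getD class_id []).length - 0) := rfl
    have hm : pvMu class_id parents (PySem.Set.add PySem.Set.empty class_id) * (pvAll class_id parents).length
        ≤ (parents.flatMap (fun kv => kv.2)).length * ((parents.flatMap (fun kv => kv.2)).length + 1) := by
      rw [hN]
      exact Nat.mul_le_mul_right _ hmu1
    have hlc : (class_id :: parents.flatMap (fun kv => kv.2)).length
        = (parents.flatMap (fun kv => kv.2)).length + 1 := by simp
    have e : ((parents.flatMap (fun kv => kv.2)).length + 1 + 1)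
          * ((parents.flatMap (fun kv => kv.2)).length + 1 + 1)
        = (parents.flatMap (fun kv => kv.2)).length * ((parents.flatMap (fun kv => kv.2)).length + 1)
          + 3 * (parents.flatMap (fun kv => kv.2)).length + 4 := by ring
    rw [hlc]
    omega
  rw [pv_main class_id parents _ [(class_id, 0)] (PySem.Set.add PySem.Set.empty class_id) [] hΦ]
  rw [pvFinishB, pvFinishB]
  rw [show pvVisitA parents (class_id :: parents.flatMap (fun kv => kv.2)).length class_id ([], PySem.Set.empty)
      = pvVisitA parents (pvAll class_id parents).length class_id ([], PySem.Set.empty) from rfl]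
  rw [pv_visit_unroll class_id parents class_id [] PySem.Set.empty
    (by simp [PySem.Set.empty]) (by simp [pvAll])]
  rw [List.drop_zero]
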